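-- pv_equiv track=rewrite | github.com/MrBrantCode/unitest_baseline | mut_generate/mist_train_taco/taco_14340/solution.py | max_alex_stones
-- ===== SOURCE A (Python) =====
-- from functools import lru_cache
-- from math import inf
--
-- def max_alex_stones(piles):
--     """
--     Calculate the maximum number of stones Alex can get assuming both players play optimally.
--
--     Parameters:
--     piles (List[int]): A list of integers where each integer represents the number of stones in a pile.
--
--     Returns:
--     int: The maximum number of stones Alex can get.
--     """
--     a = []
--     s = 0
--     n = len(piles)
--     for i in piles[::-1]:
--         s += i
--         a.append(s)
--     a = a[::-1]
--
--     @lru_cache(None)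
--     def fun(i, m):
--         if i + 2 * m >= n:
--             return a[i]
--         mn = inf
--         for ii in range(1, 2 * m + 1):
--             if ii > m:
--                 ans = fun(i + ii, ii)
--             else:
--                 ans = fun(i + ii, m)
--             if ans < mn:
--                 mn = ans
--         return a[i] - mn
--
--     return fun(0, 1)
-- ===== SOURCE B (Python) =====
-- def max_alex_stones(piles):
--     """Bottom-up iterative DP (rows built back-to-front) instead of A's memoized recursion."""
--     n = len(piles)
--     suf = [0]
--     for p in reversed(piles):
--         suf.insert(0, suf[0] + p)
--     rows = []  # rows[0] is the dp row for the smallest index processed so far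
--     for i in range(n - 1, -1, -1):
--         row = [suf[i] if i + 2 * m >= n
--                else suf[i] - min(rows[x - 1][max(x, m) - 1] for x in range(1, 2 * m + 1))
--                for m in range(1, n + 1)]
--         rows.insert(0, row)
--     return rows[0][0] if rows else 0
-- ===== Notes on version B (the rewrite author's own statement) =====
-- stated objective: alternative
-- what changed: Replaced A's top-down lru_cache recursion with an iterative bottom-up DP that builds the dp rows back-to-front (with suffix sums and Python's min() over the candidate moves), removing recursion and memoization entirely.
import Mathlib
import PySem

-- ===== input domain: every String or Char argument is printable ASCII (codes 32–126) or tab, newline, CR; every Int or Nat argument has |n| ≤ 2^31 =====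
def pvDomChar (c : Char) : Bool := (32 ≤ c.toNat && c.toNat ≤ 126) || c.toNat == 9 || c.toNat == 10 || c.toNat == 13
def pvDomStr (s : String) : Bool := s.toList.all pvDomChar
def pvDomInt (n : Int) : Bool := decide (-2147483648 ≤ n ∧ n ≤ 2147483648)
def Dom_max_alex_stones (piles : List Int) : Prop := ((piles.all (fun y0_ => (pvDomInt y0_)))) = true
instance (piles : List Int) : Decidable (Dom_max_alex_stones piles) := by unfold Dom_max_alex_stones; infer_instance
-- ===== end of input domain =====

-- B is a bottom-up iterative DP table (rows built back-to-front) replacing A's memoized recursion; objective: alternative.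

-- ===== PORT A =====

-- Python's running minimum started at float 'inf': 'none' plays inf, 'if ans < mn' keeps the first strict minimum.
def pyMinStep (mn : Option Int) (ans : Int) : Option Int :=
  match mn with
  | none => some ans
  | some v => if ans < v then some ans else some v

-- A's inner recursive 'fun(i, m)'. 'fuel' is proof scaffolding for termination: every call site
-- supplies fuel ≥ n - i, and then the fuel-0 value coincides with Python's (the guard i+2m ≥ n holds).
def funA (a : List Int) (n : Nat) : Nat → Nat → Nat → Int
  | i, _, 0 => a.getD i 0
  | i, m, fuel + 1 =>
    if n ≤ i + 2 * m then a.getD i 0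
    else
      a.getD i 0 -
        (((List.range' 1 (2 * m)).map (fun ii =>
            if ii > m then funA a n (i + ii) ii fuel else funA a n (i + ii) m fuel)).foldl
          pyMinStep none).getD 0

def max_alex_stones (piles : List Int) : Int :=
  let n := piles.length
  -- a = a[::-1] of the appended running sums over piles[::-1]
  let a := ((((PySem.List.slice? piles none none (-1)).getD []).foldl
      (fun (p : Int × List Int) x => (p.1 + x, p.2 ++ [p.1 + x])) ((0 : Int), ([] : List Int))).2).reverse
  funA a n 0 1 n

-- ===== PORT B =====

-- suf[i] = sum(piles[i:]), built by prepending running sums of reversed(piles) onto [0]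
def sufB (piles : List Int) : List Int :=
  piles.reverse.foldl (fun suf p => (suf.headD 0 + p) :: suf) [0]

-- the dp row for index i, computed from the rows for i+1 .. n-1 (all indices are in range whenever read)
def altRow (suf : List Int) (n i : Nat) (rows : List (List Int)) : List Int :=
  (List.range' 1 n).map (fun m =>
    if n ≤ i + 2 * m then suf.getD i 0
    else suf.getD i 0 -
      ((PySem.List.min?
          ((List.range' 1 (2 * m)).map (fun x => (rows.getD (x - 1) []).getD (max x m - 1) 0))
          (fun v => v)).getD 0))

-- 'for i in range(n-1, -1, -1): rows.insert(0, row)' — after k iterations rows holds the rows for i = n-k .. n-1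
def altRowsBuild (suf : List Int) (n : Nat) : Nat → List (List Int)
  | 0 => []
  | k + 1 => altRow suf n (n - (k + 1)) (altRowsBuild suf n k) :: altRowsBuild suf n k

def max_alex_stones_alt (piles : List Int) : Int :=
  let n := piles.length
  let suf := sufB piles
  let rows := altRowsBuild suf n n
  match rows with
  | [] => 0
  | r :: _ => r.getD 0 0

-- ===== PRECONDITION & SPEC =====
-- Pre_ excludes only the empty list, on which Python A raises IndexError (a[0] on the empty list a).
def Pre_max_alex_stones (piles : List Int) : Prop := piles ≠ []
instance (piles : List Int) : Decidable (Pre_max_alex_stones piles) := by unfold Pre_max_alex_stones; infer_instance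
def pvWitness_max_alex_stones : List Int := [3, 9, 1, 2]

def Spec_max_alex_stones (piles : List Int) (out : Int) : Prop := out = max_alex_stones_alt piles
instance (piles : List Int) (out : Int) : Decidable (Spec_max_alex_stones piles out) := by unfold Spec_max_alex_stones; infer_instance

-- ===== CLAIM (what is proved, stated in full; the proofs are below) =====
def Claim_equal_max_alex_stones : Prop := ∀ (piles : List Int), Dom_max_alex_stones piles → Pre_max_alex_stones piles → Spec_max_alex_stones piles (max_alex_stones piles)

-- ===== LEMMAS AND PROOFS =====

-- prefix sums of l offset by s
def pfx : Int → List Int → List Int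
  | _, [] => []
  | s, x :: xs => (s + x) :: pfx (s + x) xs

theorem length_pfx (s : Int) (l : List Int) : (pfx s l).length = l.length := by
  induction l generalizing s with
  | nil => rfl
  | cons x xs ih => simp [pfx, ih]

theorem pfx_getD (l : List Int) (s : Int) (j : Nat) (hj : j < l.length) :
    (pfx s l).getD j 0 = s + (l.take (j + 1)).sum := by
  induction l generalizing s j with
  | nil => simp at hj
  | cons x xs ih =>
    cases j with
    | zero => simp [pfx]
    | succ j =>
      simp only [pfx, List.getD_cons_succ, List.take_succ_cons, List.sum_cons]
      rw [ih (s + x) j (by simpa using hj)]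
      ring

theorem foldA_eq (l : List Int) (s : Int) (acc : List Int) :
    (l.foldl (fun (p : Int × List Int) x => (p.1 + x, p.2 ++ [p.1 + x])) (s, acc)).2
      = acc ++ pfx s l := by
  induction l generalizing s acc with
  | nil => simp [pfx]
  | cons x xs ih => simp [pfx, ih]

theorem foldB_eq (l : List Int) (acc : List Int) :
    l.foldl (fun suf p => (suf.headD 0 + p) :: suf) acc = (pfx (acc.headD 0) l).reverse ++ acc := by
  induction l generalizing acc with
  | nil => simp [pfx]
  | cons x xs ih =>
    simp only [List.foldl_cons, ih, pfx, List.reverse_cons, List.headD_cons]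
    simp

-- a.getD i 0 = sum(piles[i:]) for the reversed prefix-sum list both ports build
theorem pfx_rev_getD (piles : List Int) (i : Nat) :
    ((pfx 0 piles.reverse).reverse).getD i 0 = (piles.drop i).sum := by
  by_cases hi : i < piles.length
  · have hlen : (pfx 0 piles.reverse).length = piles.length := by
      simp [length_pfx]
    have hlt : i < ((pfx 0 piles.reverse).reverse).length := by simpa [hlen] using hi
    rw [List.getD_eq_getElem _ _ hlt, List.getElem_reverse]
    have hlt' : i < (pfx 0 piles.reverse).length := by simpa using hlt
    have hpl : (pfx 0 piles.reverse).length = piles.length := by simp [length_pfx]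
    have h2 : (pfx 0 piles.reverse).length - 1 - i < (pfx 0 piles.reverse).length := by omega
    rw [← List.getD_eq_getElem _ 0 h2, pfx_getD _ _ _ (by simpa [hlen] using h2)]
    have hn : (pfx 0 piles.reverse).length - 1 - i + 1 = piles.length - i := by omega
    rw [hn]
    have htr : piles.reverse.take (piles.length - i) = (piles.drop i).reverse := by
      have e : piles.length - (piles.length - i) = i := by omega
      rw [List.take_reverse, e]
    rw [htr]
    simp
  · have hlen : ((pfx 0 piles.reverse).reverse).length = piles.length := by simp [length_pfx]
    rw [List.getD_eq_default _ _ (by omega)]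
    rw [List.drop_eq_nil_of_le (by omega)]
    rfl

theorem sufB_getD (piles : List Int) (i : Nat) :
    (sufB piles).getD i 0 = (piles.drop i).sum := by
  unfold sufB
  rw [foldB_eq]
  simp only [List.headD_cons]
  by_cases hi : i < piles.length
  · rw [List.getD_append _ _ _ _ (by simp [length_pfx]; omega)]
    exact pfx_rev_getD piles i
  · have hlen : ((pfx 0 piles.reverse).reverse).length = piles.length := by simp [length_pfx]
    rw [List.getD_append_right _ _ _ _ (by omega)]
    rw [List.drop_eq_nil_of_le (by omega)]
    rcases Nat.lt_or_ge (i - ((pfx 0 piles.reverse).reverse).length) 1 with h | h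
    · have h0 : i - ((pfx 0 piles.reverse).reverse).length = 0 := by omega
      rw [h0]
      rfl
    · rw [List.getD_eq_default _ _ (by simpa using h)]
      rfl

-- the option running-minimum loop equals Python's min()
theorem foldl_pyMinStep_some (t : List Int) (v : Int) :
    t.foldl pyMinStep (some v) = some (t.foldl min v) := by
  induction t generalizing v with
  | nil => rfl
  | cons y ys ih =>
    simp only [List.foldl_cons]
    have hstep : pyMinStep (some v) y = some (min v y) := by
      simp only [pyMinStep]
      rcases lt_or_ge y v with h | h
      · rw [if_pos h, min_eq_right (le_of_lt h)]
      · rw [if_neg (not_lt.mpr h), min_eq_left h]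
    rw [hstep, ih]

theorem foldl_pyMinStep_eq_min? (L : List Int) :
    L.foldl pyMinStep none = PySem.List.min? L (fun v => v) := by
  cases L with
  | nil => rfl
  | cons x t =>
    simp only [List.foldl_cons]
    have h0 : pyMinStep none x = some x := rfl
    rw [h0, foldl_pyMinStep_some, PySem.List.min?_id_cons]

-- funA does not depend on the fuel as long as fuel ≥ n - i
theorem funA_congr (a : List Int) (n : Nat) :
    ∀ f1 f2 i m, n - i ≤ f1 → n - i ≤ f2 → funA a n i m f1 = funA a n i m f2 := by
  intro f1
  induction f1 with
  | zero =>
    intro f2 i m h1 _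
    cases f2 with
    | zero => rfl
    | succ f2' =>
      simp only [funA]
      rw [if_pos (by omega)]
  | succ f1' ih =>
    intro f2 i m h1 h2
    cases f2 with
    | zero =>
      simp only [funA]
      rw [if_pos (by omega)]
    | succ f2' =>
      simp only [funA]
      by_cases hg : n ≤ i + 2 * m
      · rw [if_pos hg, if_pos hg]
      · rw [if_neg hg, if_neg hg]
        have hmap : (List.range' 1 (2 * m)).map (fun ii =>
              if ii > m then funA a n (i + ii) ii f1' else funA a n (i + ii) m f1')
            = (List.range' 1 (2 * m)).map (fun ii =>
              if ii > m then funA a n (i + ii) ii f2' else funA a n (i + ii) m f2') := by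
          apply List.map_congr_left
          intro ii hii
          have hb : 1 ≤ ii ∧ ii < 1 + 2 * m := by
            constructor <;> [exact (List.mem_range'_1.mp hii).1; exact (List.mem_range'_1.mp hii).2]
          by_cases him : ii > m
          · rw [if_pos him, if_pos him]
            exact ih f2' _ _ (by omega) (by omega)
          · rw [if_neg him, if_neg him]
            exact ih f2' _ _ (by omega) (by omega)
        rw [hmap]

-- core correspondence: the entries of B's rows are the values of A's recursion
theorem rows_eq_funA (a suf : List Int) (n : Nat)
    (hsuf : ∀ i, suf.getD i 0 = a.getD i 0) :
    ∀ k, k ≤ n → ∀ j m, j < k → 1 ≤ m → m ≤ n →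
      ((altRowsBuild suf n k).getD j []).getD (m - 1) 0 = funA a n (n - k + j) m (k - j) := by
  intro k
  induction k with
  | zero => intro _ j m hj _ _; omega
  | succ k ih =>
    intro hk j m hj hm1 hmn
    cases j with
    | succ j' =>
      have h1 : (altRowsBuild suf n (k + 1)).getD (j' + 1) []
          = (altRowsBuild suf n k).getD j' [] := by
        simp [altRowsBuild]
      rw [h1, ih (by omega) j' m (by omega) hm1 hmn]
      have e1 : n - (k + 1) + (j' + 1) = n - k + j' := by omega
      have e2 : (k + 1) - (j' + 1) = k - j' := by omega
      rw [← e1, ← e2]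
    | zero =>
      have h1 : (altRowsBuild suf n (k + 1)).getD 0 []
          = altRow suf n (n - (k + 1)) (altRowsBuild suf n k) := by
        simp [altRowsBuild]
      rw [h1]
      have hrange : m - 1 < (List.range' 1 n).length := by simp; omega
      have hentry : (altRow suf n (n - (k + 1)) (altRowsBuild suf n k)).getD (m - 1) 0
          = (fun m =>
              if n ≤ (n - (k + 1)) + 2 * m then suf.getD (n - (k + 1)) 0
              else suf.getD (n - (k + 1)) 0 -
                ((PySem.List.min?
                    ((List.range' 1 (2 * m)).map (fun x =>
                      ((altRowsBuild suf n k).getD (x - 1) []).getD (max x m - 1) 0))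
                    (fun v => v)).getD 0)) ((List.range' 1 n)[m - 1]'hrange) := by
        unfold altRow
        rw [List.getD_eq_getElem _ _ (by simpa using hrange), List.getElem_map]
      have hidx : (List.range' 1 n)[m - 1]'hrange = m := by
        rw [List.getElem_range']
        omega
      rw [hentry, hidx]
      simp only [Nat.add_zero, Nat.sub_zero]
      set i := n - (k + 1) with hidef
      simp only [funA]
      by_cases hguard : n ≤ i + 2 * m
      · rw [if_pos hguard, if_pos hguard]
        exact hsuf i
      · rw [if_neg hguard, if_neg hguard]
        have hiub : i + 2 * m < n := by omega
        have hik : i = n - (k + 1) := hidef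
        have hin : k + 1 ≤ n := hk
        have hcands :
            ((List.range' 1 (2 * m)).map (fun x =>
                ((altRowsBuild suf n k).getD (x - 1) []).getD (max x m - 1) 0))
            = ((List.range' 1 (2 * m)).map (fun ii =>
                if ii > m then funA a n (i + ii) ii k else funA a n (i + ii) m k)) := by
          apply List.map_congr_left
          intro x hx
          have hxb : 1 ≤ x ∧ x < 1 + 2 * m :=
            ⟨(List.mem_range'_1.mp hx).1, (List.mem_range'_1.mp hx).2⟩
          have hx2m : x ≤ 2 * m := by omega
          have hxk : x - 1 < k := by omega
          have hmax1 : 1 ≤ max x m := le_trans hm1 (le_max_right x m)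
          have hmaxn : max x m ≤ n := max_le (by omega) (by omega)
          rw [ih (by omega) (x - 1) (max x m) hxk hmax1 hmaxn]
          have e1 : n - k + (x - 1) = i + x := by omega
          rw [e1]
          have hcg : funA a n (i + x) (max x m) (k - (x - 1)) = funA a n (i + x) (max x m) k := by
            apply funA_congr
            · omega
            · omega
          rw [hcg]
          by_cases hxm : x > m
          · rw [if_pos hxm, max_eq_left (le_of_lt hxm)]
          · rw [if_neg hxm, max_eq_right (by omega)]
        rw [hsuf i, foldl_pyMinStep_eq_min?, hcands]

theorem sufB_eq_a (piles : List Int) (i : Nat) :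
    (sufB piles).getD i 0
      = (((((PySem.List.slice? piles none none (-1)).getD []).foldl
          (fun (p : Int × List Int) x => (p.1 + x, p.2 ++ [p.1 + x])) ((0 : Int), ([] : List Int))).2).reverse).getD i 0 := by
  rw [PySem.List.slice?_none_none_neg_one]
  simp only [Option.getD_some]
  rw [foldA_eq]
  simp only [List.nil_append]
  rw [sufB_getD, pfx_rev_getD]

-- ===== VERDICT (by name: the statement is the Claim_ definition above) =====
theorem max_alex_stones_spec : Claim_equal_max_alex_stones := by
  intro piles _ hpre
  unfold Spec_max_alex_stones
  simp only [max_alex_stones, max_alex_stones_alt]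
  set n := piles.length with hn
  have hn1 : 1 ≤ n := by
    cases piles with
    | nil => exact absurd rfl hpre
    | cons x xs => simp [hn]
  set a := ((((PySem.List.slice? piles none none (-1)).getD []).foldl
      (fun (p : Int × List Int) x => (p.1 + x, p.2 ++ [p.1 + x])) ((0 : Int), ([] : List Int))).2).reverse with ha
  have hsuf : ∀ i, (sufB piles).getD i 0 = a.getD i 0 := by
    intro i; rw [ha]; exact sufB_eq_a piles i
  have hmain := rows_eq_funA a (sufB piles) n hsuf n (le_refl n) 0 1 (by omega) (by omega) hn1
  have e1 : n - n + 0 = 0 := by omega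
  have e2 : n - 0 = n := by omega
  rw [e1, e2] at hmain
  cases hrows : altRowsBuild (sufB piles) n n with
  | nil =>
    exfalso
    have hne : altRowsBuild (sufB piles) n n ≠ [] := by
      cases hnn : n with
      | zero => omega
      | succ k => simp [altRowsBuild]
    exact hne hrows
  | cons r rest =>
    rw [hrows] at hmain
    simpa using hmain.symm
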